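-- pv_equiv track=rewrite | github.com/KastnerRG/aie-intrinsics-nn | gemv_i16/16bx16b_scheme.py | compute_scheme
-- ===== SOURCE A (Python) =====
-- def compute_scheme(rows, cols, start, offset, offset_hi, step, buffer_size):
--     idx = []
--     row = []
--
--     for i in range(rows * cols):
--         c = i % cols
--         r = i // cols
--
--         if r < 8:
--             base = offset
--         else:
--             base = offset_hi
--
--         if r % 2 == 0:
--             offs = base[r % 8] * 2
--         else:
--             offs = base[r % 8] * 2 + (base[(r - 1) % 8] + 1) * 2
--
--         xstep = (c // 2) * step + (c % 2)
--         ystep = -(c // 2) * step + (c % 2)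
--
--         index = (start + offs + xstep) % buffer_size
--         row.append(index)
--
--         if c == cols - 1:
--             idx.append(row)
--             row = []
--
--     return idx
-- ===== SOURCE B (Python) =====
-- def compute_scheme(rows, cols, start, offset, offset_hi, step, buffer_size):
--     # per-row offset table
--     offs = []
--     for r in range(rows):
--         base = offset if r < 8 else offset_hi
--         o = base[r % 8] * 2
--         if r % 2 == 1:
--             o += (base[(r - 1) % 8] + 1) * 2
--         offs.append(o)
--     if not offs:
--         return []
--     # per-column step table
--     xstep = [(c // 2) * step + (c % 2) for c in range(cols)]
--     # combine
--     return [[(start + o + x) % buffer_size for x in xstep] for o in offs]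
-- ===== Notes on version B (the rewrite author's own statement) =====
-- stated objective: faster
-- what changed: Replaced the single flat loop over rows*cols cells (per-cell div/mod index arithmetic, row-offset recomputation and a row accumulator) by two independent 1-D precompute passes (a per-row offset table and a per-column step table) combined in a nested comprehension, dropping the unused ystep; the per-cell work shrinks to one add+mod.
-- outside the precondition, e.g. on compute_scheme(1, 0, 0, [5], [], 0, 1): A returns [], B returns [[]]; on compute_scheme(2, 0, 0, [], [], 0, 1): A returns [], B raises IndexError
import Mathlib
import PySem

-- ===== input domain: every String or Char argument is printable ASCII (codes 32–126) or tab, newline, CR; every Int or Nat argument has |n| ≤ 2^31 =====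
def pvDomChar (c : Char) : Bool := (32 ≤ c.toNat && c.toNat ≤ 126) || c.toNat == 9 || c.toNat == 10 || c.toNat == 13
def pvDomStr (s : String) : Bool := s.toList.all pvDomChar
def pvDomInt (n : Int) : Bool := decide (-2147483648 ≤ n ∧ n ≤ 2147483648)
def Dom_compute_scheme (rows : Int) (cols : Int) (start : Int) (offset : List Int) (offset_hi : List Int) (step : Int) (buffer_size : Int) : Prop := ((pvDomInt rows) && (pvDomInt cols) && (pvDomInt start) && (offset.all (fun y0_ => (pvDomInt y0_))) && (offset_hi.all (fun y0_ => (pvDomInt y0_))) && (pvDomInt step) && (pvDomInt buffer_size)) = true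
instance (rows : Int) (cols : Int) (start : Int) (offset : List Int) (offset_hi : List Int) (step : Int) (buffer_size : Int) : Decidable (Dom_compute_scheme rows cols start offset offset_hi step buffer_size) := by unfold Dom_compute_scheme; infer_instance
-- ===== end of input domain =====

-- B replaces A's flat loop over rows*cols (div/mod arithmetic + row accumulator) by two 1-D
-- precompute passes (per-row offset table, per-column step table) combined in a nested map: simpler.

-- ===== PORT A =====
-- the loop body of A's single for-loop, named so the proofs can talk about one step
-- (pyGet? …).getD 0 : Pre_ guarantees the index is in range, so the IndexError case (none) is unreachable inside Pre_
def compute_scheme_step (cols : Int) (start : Int) (offset : List Int) (offset_hi : List Int) (step : Int) (buffer_size : Int) (s : List (List Int) × List Int) (i : Int) : List (List Int) × List Int :=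
  let c := PySem.Int.mod i cols
  let r := PySem.Int.floordiv i cols
  let base := if r < 8 then offset else offset_hi
  let offs := if PySem.Int.mod r 2 = 0 then
      ((PySem.List.pyGet? base (PySem.Int.mod r 8)).getD 0) * 2
    else
      ((PySem.List.pyGet? base (PySem.Int.mod r 8)).getD 0) * 2 + (((PySem.List.pyGet? base (PySem.Int.mod (r - 1) 8)).getD 0) + 1) * 2
  let xstep := (PySem.Int.floordiv c 2) * step + PySem.Int.mod c 2
  let _ystep := -(PySem.Int.floordiv c 2) * step + PySem.Int.mod c 2   -- computed and unused, as in A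
  let index := PySem.Int.mod (start + offs + xstep) buffer_size
  let row' := s.2 ++ [index]
  if c = cols - 1 then (s.1 ++ [row'], ([] : List Int)) else (s.1, row')

def compute_scheme (rows : Int) (cols : Int) (start : Int) (offset : List Int) (offset_hi : List Int) (step : Int) (buffer_size : Int) : List (List Int) :=
  ((PySem.List.pyRange 0 (rows * cols) 1).foldl
    (compute_scheme_step cols start offset offset_hi step buffer_size)
    (([] : List (List Int)), ([] : List Int))).1

-- ===== PORT B =====
def compute_scheme_alt (rows : Int) (cols : Int) (start : Int) (offset : List Int) (offset_hi : List Int) (step : Int) (buffer_size : Int) : List (List Int) :=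
  let offs := (PySem.List.pyRange 0 rows 1).foldl (fun (acc : List Int) (r : Int) =>
      let base := if r < 8 then offset else offset_hi
      let o := ((PySem.List.pyGet? base (PySem.Int.mod r 8)).getD 0) * 2
      let o := if PySem.Int.mod r 2 = 1 then o + (((PySem.List.pyGet? base (PySem.Int.mod (r - 1) 8)).getD 0) + 1) * 2 else o
      acc ++ [o]) []
  if offs = [] then [] else
  let xstep := (PySem.List.pyRange 0 cols 1).map (fun c => (PySem.Int.floordiv c 2) * step + PySem.Int.mod c 2)
  offs.map (fun o => xstep.map (fun x => PySem.Int.mod (start + o + x) buffer_size))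

-- ===== PRECONDITION & SPEC =====
-- Pre_ excludes (a) inputs where A raises (zero buffer_size, or an offset table shorter than the row
-- indices used, on a grid whose loop runs), and (b) non-positive cols with positive rows, where A's
-- uniform [] is an artefact of its append-on-last-column accumulator (the row never completes) while
-- B's per-row view gives rows empty rows (or an IndexError from building the row table): a degenerate
-- grid on which either answer is defensible. Non-positive rows stay inside Pre_ when A's loop is
-- empty or provably crash-free (full 8-entry offset table, non-zero buffer).
def Pre_compute_scheme (rows : Int) (cols : Int) (start : Int) (offset : List Int) (offset_hi : List Int) (step : Int) (buffer_size : Int) : Prop :=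
  (1 ≤ cols ∧ (1 ≤ rows → (buffer_size ≠ 0 ∧ min rows 8 ≤ (offset.length : Int) ∧ min (rows - 8) 8 ≤ (offset_hi.length : Int))))
    ∨ (rows ≤ 0 ∧ (cols = 0 ∨ rows = 0 ∨ (cols < 0 ∧ buffer_size ≠ 0 ∧ 8 ≤ (offset.length : Int))))
instance (rows : Int) (cols : Int) (start : Int) (offset : List Int) (offset_hi : List Int) (step : Int) (buffer_size : Int) : Decidable (Pre_compute_scheme rows cols start offset offset_hi step buffer_size) := by unfold Pre_compute_scheme; infer_instance

def pvWitness_compute_scheme : Int × Int × Int × List Int × List Int × Int × Int := (2, 3, 5, [1, 2], [], 4, 16)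

def Spec_compute_scheme (rows : Int) (cols : Int) (start : Int) (offset : List Int) (offset_hi : List Int) (step : Int) (buffer_size : Int) (out : List (List Int)) : Prop := out = compute_scheme_alt rows cols start offset offset_hi step buffer_size
instance (rows : Int) (cols : Int) (start : Int) (offset : List Int) (offset_hi : List Int) (step : Int) (buffer_size : Int) (out : List (List Int)) : Decidable (Spec_compute_scheme rows cols start offset offset_hi step buffer_size out) := by unfold Spec_compute_scheme; infer_instance

-- ===== CLAIM (what is proved, stated in full; the proofs are below) =====
def Claim_equal_compute_scheme : Prop := ∀ (rows : Int) (cols : Int) (start : Int) (offset : List Int) (offset_hi : List Int) (step : Int) (buffer_size : Int), Dom_compute_scheme rows cols start offset offset_hi step buffer_size → Pre_compute_scheme rows cols start offset offset_hi step buffer_size → Spec_compute_scheme rows cols start offset offset_hi step buffer_size (compute_scheme rows cols start offset offset_hi step buffer_size)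

-- ===== LEMMAS AND PROOFS =====

-- the per-row offset value both programs compute (written as in A's even/odd branch)
def pvOffs (offset offset_hi : List Int) (r : Int) : Int :=
  let base := if r < 8 then offset else offset_hi
  if PySem.Int.mod r 2 = 0 then
    ((PySem.List.pyGet? base (PySem.Int.mod r 8)).getD 0) * 2
  else
    ((PySem.List.pyGet? base (PySem.Int.mod r 8)).getD 0) * 2 + (((PySem.List.pyGet? base (PySem.Int.mod (r - 1) 8)).getD 0) + 1) * 2

-- the value at grid cell (r, c)
def pvCell (start : Int) (offset offset_hi : List Int) (step buffer_size : Int) (r c : Int) : Int :=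
  PySem.Int.mod (start + pvOffs offset offset_hi r + ((PySem.Int.floordiv c 2) * step + PySem.Int.mod c 2)) buffer_size

lemma pv_alt_eq (rows cols start : Int) (offset offset_hi : List Int) (step buffer_size : Int) :
    compute_scheme_alt rows cols start offset offset_hi step buffer_size
      = (PySem.List.pyRange 0 rows 1).map (fun r =>
          (PySem.List.pyRange 0 cols 1).map (pvCell start offset offset_hi step buffer_size r)) := by
  simp only [compute_scheme_alt, PySem.List.foldl_append_singleton_eq_map, List.map_map,
    List.nil_append]
  rcases eq_or_ne (PySem.List.pyRange 0 rows 1) [] with hnil | hnil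
  · simp [hnil]
  · rw [if_neg (by simp [List.map_eq_nil_iff, hnil])]
    refine List.map_congr_left ?_
    intro r _
    simp only [Function.comp_def]
    refine List.map_congr_left ?_
    intro c _
    rcases PySem.Int.mod_two_eq r with h | h <;> simp only [pvCell, pvOffs, h] <;> norm_num

lemma pv_div_mod_block (cols q t : Int) (hc : 1 ≤ cols) (h0 : 0 ≤ t) (ht : t < cols) :
    PySem.Int.floordiv (q * cols + t) cols = q ∧ PySem.Int.mod (q * cols + t) cols = t := by
  have hdiv : PySem.Int.floordiv (q * cols + t) cols = q := by
    rw [PySem.Int.floordiv_eq_iff_of_pos (by omega)]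
    constructor
    · linarith
    · have h : (q + 1) * cols = q * cols + cols := by ring
      linarith
  refine ⟨hdiv, ?_⟩
  have h := PySem.Int.floordiv_mul_add_mod (q * cols + t) cols
  rw [hdiv] at h
  omega

lemma pv_rowA (cols start : Int) (offset offset_hi : List Int) (step buffer_size : Int)
    (hc : 1 ≤ cols) (q : Int) :
    ∀ (m : ℕ) (t : Int) (idx : List (List Int)) (row : List Int), 1 ≤ m → t + (m : Int) = cols → 0 ≤ t →
      (PySem.List.pyRange (q * cols + t) (q * cols + cols) 1).foldl
          (compute_scheme_step cols start offset offset_hi step buffer_size) (idx, row)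
        = (idx ++ [row ++ (PySem.List.pyRange t cols 1).map (pvCell start offset offset_hi step buffer_size q)], []) := by
  intro m
  induction m with
  | zero => intro t idx row h1 _ _; exact absurd h1 (by omega)
  | succ m ih =>
    intro t idx row _ h2 h3
    have ht : t < cols := by push_cast at h2; omega
    obtain ⟨hdiv, hmod⟩ := pv_div_mod_block cols q t hc h3 ht
    rw [PySem.List.pyRange_one_cons (by linarith)]
    simp only [List.foldl_cons, compute_scheme_step, hdiv, hmod]
    by_cases hm : m = 0
    · subst hm
      have htc : t = cols - 1 := by push_cast at h2; omega
      rw [if_pos htc,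
        PySem.List.pyRange_one_eq_nil (show q * cols + cols ≤ q * cols + t + 1 by omega),
        show PySem.List.pyRange t cols 1 = [t] by
          rw [show cols = t + 1 by omega]; exact PySem.List.pyRange_one_singleton t]
      simp [pvCell, pvOffs]
    · have hne : ¬ (t = cols - 1) := by push_cast at h2; omega
      rw [if_neg hne,
        show q * cols + t + 1 = q * cols + (t + 1) by ring,
        ih (t + 1) idx _ (by omega) (by push_cast at h2 ⊢; omega) (by omega),
        PySem.List.pyRange_one_cons ht]
      simp [pvCell, pvOffs, List.append_assoc]

lemma pv_gridA (cols start : Int) (offset offset_hi : List Int) (step buffer_size : Int)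
    (hc : 1 ≤ cols) :
    ∀ (n : ℕ),
      ((PySem.List.pyRange 0 ((n : Int) * cols) 1).foldl
          (compute_scheme_step cols start offset offset_hi step buffer_size)
          (([] : List (List Int)), ([] : List Int)))
        = ((PySem.List.pyRange 0 (n : Int) 1).map (fun q =>
            (PySem.List.pyRange 0 cols 1).map (pvCell start offset offset_hi step buffer_size q)), []) := by
  intro n
  induction n with
  | zero => simp [PySem.List.pyRange_one_eq_nil (le_refl (0 : Int))]
  | succ n ih =>
    have h1 : ((n + 1 : ℕ) : Int) * cols = (n : Int) * cols + cols := by push_cast; ring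
    have h0 : (0 : Int) ≤ (n : Int) * cols := mul_nonneg (Int.natCast_nonneg n) (by omega)
    rw [h1, PySem.List.pyRange_one_append 0 ((n : Int) * cols) ((n : Int) * cols + cols) h0 (by omega),
      List.foldl_append, ih]
    have hrow := pv_rowA cols start offset offset_hi step buffer_size hc (n : Int) cols.toNat 0
      ((PySem.List.pyRange 0 (n : Int) 1).map (fun q =>
        (PySem.List.pyRange 0 cols 1).map (pvCell start offset offset_hi step buffer_size q)))
      [] (by omega) (by omega) le_rfl
    simp only [add_zero, List.nil_append] at hrow
    rw [hrow, show ((n + 1 : ℕ) : Int) = (n : Int) + 1 by push_cast; ring,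
      PySem.List.pyRange_one_succ_right (Int.natCast_nonneg n), List.map_append]
    simp

lemma pv_fold_no_close (cols start : Int) (offset offset_hi : List Int) (step buffer_size : Int)
    (hc : cols < 0) :
    ∀ (l : List Int) (s : List (List Int) × List Int),
      (l.foldl (compute_scheme_step cols start offset offset_hi step buffer_size) s).1 = s.1 := by
  intro l
  induction l with
  | nil => intro s; rfl
  | cons i l ih =>
    intro s
    simp only [List.foldl_cons, compute_scheme_step]
    have hb := PySem.Int.mod_neg_bounds (a := i) hc
    rw [if_neg (show ¬ (PySem.Int.mod i cols = cols - 1) by omega)]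
    exact ih _

lemma pv_alt_nil (rows cols start : Int) (offset offset_hi : List Int) (step buffer_size : Int)
    (hr : rows ≤ 0) :
    compute_scheme_alt rows cols start offset offset_hi step buffer_size = [] := by
  rw [pv_alt_eq, PySem.List.pyRange_one_eq_nil hr, List.map_nil]

-- ===== VERDICT (by name: the statement is the Claim_ definition above) =====
theorem compute_scheme_spec : Claim_equal_compute_scheme := by
  intro rows cols start offset offset_hi step buffer_size _ hpre
  unfold Spec_compute_scheme
  rcases hpre with ⟨hc, -⟩ | ⟨hr, hcase⟩
  · rw [pv_alt_eq]
    by_cases hr : rows ≤ 0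
    · have h1 : rows * cols ≤ 0 := mul_nonpos_of_nonpos_of_nonneg hr (by omega)
      unfold compute_scheme
      rw [PySem.List.pyRange_one_eq_nil h1, PySem.List.pyRange_one_eq_nil hr]
      simp
    · have hn : rows = ((rows.toNat : Int)) := (Int.toNat_of_nonneg (by omega)).symm
      unfold compute_scheme
      rw [hn, pv_gridA cols start offset offset_hi step buffer_size hc rows.toNat]
  · rw [pv_alt_nil rows cols start offset offset_hi step buffer_size hr]
    rcases hcase with hc0 | hr0 | ⟨hcn, -, -⟩
    · unfold compute_scheme
      rw [show rows * cols = 0 by rw [hc0]; ring, PySem.List.pyRange_one_eq_nil le_rfl]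
      rfl
    · unfold compute_scheme
      rw [show rows * cols = 0 by rw [hr0]; ring, PySem.List.pyRange_one_eq_nil le_rfl]
      rfl
    · unfold compute_scheme
      exact pv_fold_no_close cols start offset offset_hi step buffer_size hcn _ _
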